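-- pv_equiv track=rewrite | github.com/leihchen/leetcode | mac/gg.py | longest_list
-- ===== SOURCE A (Python) =====
-- def longest_list(n):
--     sum_ = 0
--     res = []
--     for i in range(1, n):
--         if sum_ + i * 2 <= n:
--             res.append(i*2)
--             sum_ += i * 2
--         else:
--             break
--     res[-1] += n - sum_
--     return res
-- ===== SOURCE B (Python) =====
-- def longest_list(n):
--     # count the number of even terms in closed form via a pure counter,
--     # then construct the whole list at once and fix up the last element
--     k = 0
--     while (k + 1) * (k + 2) <= n:
--         k += 1
--     res = [2 * i for i in range(1, k + 1)]
--     res[-1] += n - k * (k + 1)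
--     return res
-- ===== Notes on version B (the rewrite author's own statement) =====
-- stated objective: alternative
-- what changed: A accumulates a running sum and appends term by term inside a range loop with a break; B first counts the number of terms k with a plain counter loop, then constructs the list in one comprehension and adjusts the last element.
import Mathlib
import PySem

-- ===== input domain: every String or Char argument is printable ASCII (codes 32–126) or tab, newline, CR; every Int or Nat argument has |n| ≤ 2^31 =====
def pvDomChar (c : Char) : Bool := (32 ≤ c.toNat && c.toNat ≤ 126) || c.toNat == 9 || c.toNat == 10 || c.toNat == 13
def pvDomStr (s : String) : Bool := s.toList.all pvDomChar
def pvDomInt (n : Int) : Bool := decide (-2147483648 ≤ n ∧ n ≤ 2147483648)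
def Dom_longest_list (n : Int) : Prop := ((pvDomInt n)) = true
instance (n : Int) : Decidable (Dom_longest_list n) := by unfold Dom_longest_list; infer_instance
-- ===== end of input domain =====

-- B replaces A's accumulate-and-append loop by a count-then-construct decomposition (alternative, same cost).
-- For n < 2 both Pythons raise IndexError (res[-1] on an empty list); those inputs are outside Pre_.

-- ===== PORT A =====
-- A's for-loop with break over range(1, n): structural recursion over the remaining range,
-- carrying (res, sum_) exactly as A does.
def aLoop (n : Int) : Int → List Int → List Int → List Int × Int
  | sum_, res, [] => (res, sum_)
  | sum_, res, i :: rest =>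
    if sum_ + i * 2 ≤ n then aLoop n (sum_ + i * 2) (res ++ [i * 2]) rest
    else (res, sum_)

def longest_list (n : Int) : List Int :=
  let p := aLoop n 0 [] (PySem.List.pyRange 1 n 1)
  -- res[-1] += n - sum_ : Python raises IndexError on the empty list (n < 2), excluded by Pre_
  match p.1.getLast? with
  | none => []
  | some l => p.1.dropLast ++ [l + (n - p.2)]

-- ===== PORT B =====
-- B's counter loop: while (k+1)*(k+2) <= n: k += 1
def bCount (n k : Int) : Int :=
  if h : (k + 1) * (k + 2) ≤ n then bCount n (k + 1) else k
termination_by (n - k).toNat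
decreasing_by
  have hk : k < n := by nlinarith [sq_nonneg (2*k + 3)]
  omega

def longest_list_alt (n : Int) : List Int :=
  let k := bCount n 0
  let res := (PySem.List.pyRange 1 (k + 1) 1).map (fun i => 2 * i)
  -- res[-1] += n - k*(k+1) : IndexError on the empty list (n < 2), excluded by Pre_
  match res.getLast? with
  | none => []
  | some l => res.dropLast ++ [l + (n - k * (k + 1))]

-- ===== PRECONDITION & SPEC =====
-- Pre_ excludes exactly n < 2, where Python A raises IndexError (res[-1] on the empty list).
def Pre_longest_list (n : Int) : Prop := 2 ≤ n
instance (n : Int) : Decidable (Pre_longest_list n) := by unfold Pre_longest_list; infer_instance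
def pvWitness_longest_list : Int := (12)

def Spec_longest_list (n : Int) (out : List Int) : Prop := out = longest_list_alt n
instance (n : Int) (out : List Int) : Decidable (Spec_longest_list n out) := by unfold Spec_longest_list; infer_instance

-- ===== CLAIM (what is proved, stated in full; the proofs are below) =====
def Claim_equal_longest_list : Prop := ∀ (n : Int), Dom_longest_list n → Pre_longest_list n → Spec_longest_list n (longest_list n)

-- ===== LEMMAS AND PROOFS =====

theorem bCount_step (n k : Int) (h : (k + 1) * (k + 2) ≤ n) :
    bCount n k = bCount n (k + 1) := by
  conv_lhs => rw [bCount]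
  rw [dif_pos h]

theorem bCount_stop (n k : Int) (h : ¬ (k + 1) * (k + 2) ≤ n) :
    bCount n k = k := by
  conv_lhs => rw [bCount]
  rw [dif_neg h]

-- the counter never decreases
theorem bCount_ge (n k : Int) : k ≤ bCount n k := by
  fun_induction bCount n k with
  | case1 k h ih => omega
  | case2 k h => omega

-- A's loop, started after having taken terms 1..k (sum = k*(k+1)), produces exactly
-- the remaining even terms up to 2 * bCount n k and the final sum.
theorem aLoop_spec (n : Int) : ∀ (k : Int) (res : List Int), 1 ≤ k → k * (k + 1) ≤ n →
    aLoop n (k * (k + 1)) res (PySem.List.pyRange (k + 1) n 1) =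
      (res ++ (PySem.List.pyRange (k + 1) (bCount n k + 1) 1).map (fun i => 2 * i),
       bCount n k * (bCount n k + 1)) := by
  intro k res hk hkn
  by_cases h : (k + 1) * (k + 2) ≤ n
  · -- loop continues
    have hlt : k + 1 < n := by nlinarith
    rw [PySem.List.pyRange_one_cons hlt, aLoop]
    have hcond : k * (k + 1) + (k + 1) * 2 ≤ n := by nlinarith
    rw [if_pos hcond]
    have harith : k * (k + 1) + (k + 1) * 2 = (k + 1) * (k + 1 + 1) := by ring
    have ih := aLoop_spec n (k + 1) (res ++ [(k + 1) * 2]) (by omega) (by linarith [harith ▸ hcond])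
    rw [harith, ih, ← bCount_step n k h]
    have hB : k + 1 ≤ bCount n (k + 1) := bCount_ge n (k + 1)
    rw [← bCount_step n k h] at hB
    rw [PySem.List.pyRange_one_cons (a := k + 1) (b := bCount n k + 1) (by omega)]
    simp [mul_comm]
  · -- loop stops: bCount n k = k and the remaining contribution is empty
    rw [bCount_stop n k h]
    simp only [PySem.List.pyRange_one_eq_nil (le_refl (k + 1)), List.map_nil, List.append_nil]
    by_cases hend : n ≤ k + 1
    · rw [PySem.List.pyRange_one_eq_nil hend, aLoop]
    · rw [PySem.List.pyRange_one_cons (by omega), aLoop]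
      have : ¬ k * (k + 1) + (k + 1) * 2 ≤ n := by intro hc; apply h; nlinarith
      rw [if_neg this]
termination_by k => (n - k).toNat
decreasing_by omega

-- ===== VERDICT (by name: the statement is the Claim_ definition above) =====
theorem longest_list_spec : Claim_equal_longest_list := by
  intro n _ hn
  have hn2 : (2 : Int) ≤ n := hn
  unfold Spec_longest_list longest_list longest_list_alt
  have h02 : (0 + 1) * (0 + 2) ≤ n := by omega
  have hb0 : bCount n 0 = bCount n 1 := bCount_step n 0 h02
  have hstep : aLoop n 0 [] (PySem.List.pyRange 1 n 1)
      = aLoop n (1 * (1 + 1)) [1 * 2] (PySem.List.pyRange (1 + 1) n 1) := by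
    rw [PySem.List.pyRange_one_cons (a := 1) (b := n) (by omega), aLoop]
    have hc : (0 : Int) + 1 * 2 ≤ n := by omega
    rw [if_pos hc]
    norm_num
  rw [hstep, aLoop_spec n 1 [1 * 2] (by omega) (by omega)]
  have hB1 : 1 ≤ bCount n 1 := bCount_ge n 1
  have hlist : (1 : Int) * 2 :: (PySem.List.pyRange (1 + 1) (bCount n 1 + 1) 1).map (fun i => 2 * i)
      = (PySem.List.pyRange 1 (bCount n 1 + 1) 1).map (fun i => 2 * i) := by
    rw [PySem.List.pyRange_one_cons (a := 1) (b := bCount n 1 + 1) (by omega)]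
    norm_num
  rw [hb0]
  simp only [List.singleton_append, hlist]
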